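-- pv_equiv track=rewrite | github.com/epam/dial-xl | python/assistant/quantgrid_1/utils/formatting.py | _format_manual_table
-- ===== SOURCE A (Python) =====
-- from typing import Any, Dict, Iterable
--
-- def _format_manual_table(fields: dict[str, list[Any]]) -> str:
--     table = ""
--
--     max_lines = 0
--
--     table += "|"
--     for field_name, values in fields.items():
--         table += f"{field_name}|"
--         max_lines = max(max_lines, len(values))
--     table += "\n"
--
--     table += "|"
--     for _ in fields:
--         table += "--|"
--     table += "\n"
--
--     for i in range(max_lines):
--         table += "|"
--         for values in fields.values():
--             table += f"{values[i] if i < len(values) else ''}|"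
--         table += "\n"
--
--     return table
-- ===== SOURCE B (Python) =====
-- def _format_manual_table(fields: dict[str, list] ) -> str:
--     names = list(fields)
--     cols = [list(v) for v in fields.values()]
--     lines = ["|" + "".join(n + "|" for n in names),
--              "|" + "--|" * len(names)]
--     while any(cols):
--         lines.append("|" + "".join(f"{c[0] if c else ''}|" for c in cols))
--         cols = [c[1:] for c in cols]
--     return "\n".join(lines) + "\n"
-- ===== Notes on version B (the rewrite author's own statement) =====
-- stated objective: alternative
-- what changed: B builds the table as a list of row lines joined with newlines, producing body rows by repeatedly taking the heads of the columns and dropping them (a destructive transpose), instead of A's pre-pass computing max_lines followed by bounds-checked indexing values[i] in a nested index loop.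
import Mathlib
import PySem

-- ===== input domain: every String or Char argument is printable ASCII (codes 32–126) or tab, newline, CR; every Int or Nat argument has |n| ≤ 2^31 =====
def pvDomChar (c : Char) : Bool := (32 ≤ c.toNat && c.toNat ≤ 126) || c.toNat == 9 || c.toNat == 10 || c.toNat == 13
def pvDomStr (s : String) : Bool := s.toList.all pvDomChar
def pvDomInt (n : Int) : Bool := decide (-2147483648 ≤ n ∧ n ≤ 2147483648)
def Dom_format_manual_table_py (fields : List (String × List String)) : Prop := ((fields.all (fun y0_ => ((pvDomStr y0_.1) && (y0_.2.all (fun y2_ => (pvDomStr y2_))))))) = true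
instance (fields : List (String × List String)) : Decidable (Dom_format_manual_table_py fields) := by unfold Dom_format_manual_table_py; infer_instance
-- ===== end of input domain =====

-- B builds rows by repeatedly popping column heads and joins the lines; A precomputes max_lines and indexes.

-- ===== PORT A =====
def format_manual_table_py (fields : List (String × List String)) : String :=
  let table := ""
  let max_lines : Nat := 0
  let table := table ++ "|"
  let st := fields.foldl (fun (p : String × Nat) kv =>
      (p.1 ++ kv.1 ++ "|", max p.2 kv.2.length)) (table, max_lines)
  let table := st.1; let max_lines := st.2
  let table := table ++ "\n"
  let table := table ++ "|"
  let table := fields.foldl (fun s _ => s ++ "--|") table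
  let table := table ++ "\n"
  let table := (List.range max_lines).foldl (fun s i =>
      (fields.foldl (fun s (kv : String × List String) =>
        s ++ (if i < kv.2.length then kv.2.getD i "" else "") ++ "|") (s ++ "|")) ++ "\n") table
  table

-- ===== PORT B =====
-- termination helper for the popping loop
theorem sum_len_pred_le (cols : List (List String)) :
    (cols.map (fun c => c.length - 1)).sum ≤ (cols.map List.length).sum := by
  induction cols with
  | nil => simp
  | cons c cs ih => simp only [List.map_cons, List.sum_cons]; omega

theorem altRows_dec (cols : List (List String)) (h : cols.any (fun c => !c.isEmpty) = true) :
    ((cols.map (fun c => c.drop 1)).map List.length).sum < (cols.map List.length).sum := by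
  rw [List.map_map]
  have hc : (List.length ∘ fun c : List String => c.drop 1) = fun c : List String => c.length - 1 := by
    funext c; simp [List.length_drop]
  rw [hc]
  induction cols with
  | nil => simp at h
  | cons c cs ih =>
    simp only [List.any_cons, Bool.or_eq_true] at h
    simp only [List.map_cons, List.sum_cons]
    rcases h with h | h
    · have h0 : 0 < c.length := by cases c <;> simp_all
      have := sum_len_pred_le cs
      omega
    · have := ih h
      omega

def altRows (cols : List (List String)) : List String :=
  if h : cols.any (fun c => !c.isEmpty) = true then
    ("|" ++ String.join (cols.map (fun c => c.headD "" ++ "|"))) :: altRows (cols.map (fun c => c.drop 1))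
  else []
termination_by (cols.map List.length).sum
decreasing_by simpa using altRows_dec cols h

def format_manual_table_py_alt (fields : List (String × List String)) : String :=
  let names := fields.map (·.1)
  let cols := fields.map (·.2)
  let lines := ("|" ++ String.join (names.map (· ++ "|")))
            :: ("|" ++ String.join (List.replicate names.length "--|"))
            :: altRows cols
  PySem.Str.join "\n" lines ++ "\n"

-- ===== PRECONDITION & SPEC =====
def Spec_format_manual_table_py (fields : List (String × List String)) (out : String) : Prop := out = format_manual_table_py_alt fields
instance (fields : List (String × List String)) (out : String) : Decidable (Spec_format_manual_table_py fields out) := by unfold Spec_format_manual_table_py; infer_instance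

-- ===== CLAIM (what is proved, stated in full; the proofs are below) =====
def Claim_equal_format_manual_table_py : Prop := ∀ (fields : List (String × List String)), Dom_format_manual_table_py fields → Spec_format_manual_table_py fields (format_manual_table_py fields)

-- ===== LEMMAS AND PROOFS =====

theorem sfoldl_shift (l : List String) (s t : String) :
    l.foldl (· ++ ·) (s ++ t) = s ++ l.foldl (· ++ ·) t := by
  induction l generalizing t with
  | nil => simp
  | cons a l ih => simp only [List.foldl_cons, String.append_assoc]; exact ih (t ++ a)

theorem sjoin_cons (s : String) (l : List String) : String.join (s :: l) = s ++ String.join l := by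
  rw [String.join, String.join, List.foldl_cons]
  rw [show ("" ++ s : String) = s ++ "" from by simp]
  exact sfoldl_shift l s ""

theorem sjoin_cons_cons (a b : String) (l : List String) :
    PySem.Str.join "
" (a :: b :: l) = a ++ "
" ++ PySem.Str.join "
" (b :: l) := by
  rw [PySem.Str.join, PySem.Str.join, List.map_cons, List.map_cons, PySem.Chars.join_cons_cons]
  rw [String.ofList_append, String.ofList_append, String.ofList_toList, String.ofList_toList]

theorem sjoin_single (a : String) : PySem.Str.join "
" [a] = a := by
  rw [PySem.Str.join, List.map_cons, List.map_nil]
  rw [show PySem.Chars.join "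
".toList [a.toList] = a.toList from by
    simp [PySem.Chars.join, List.intercalate]]
  exact String.ofList_toList

theorem joinlines (a : String) (l : List String) :
    PySem.Str.join "
" (a :: l) ++ "
" = a ++ "
" ++ String.join (l.map (· ++ "
")) := by
  induction l generalizing a with
  | nil => rw [sjoin_single]; simp [String.join]
  | cons b l ih =>
    rw [sjoin_cons_cons, List.map_cons, sjoin_cons, String.append_assoc, String.append_assoc, ← ih b]
    simp [String.append_assoc]

theorem pairfold (l : List (String × List String)) (s : String) (n : Nat) :
    l.foldl (fun (p : String × Nat) kv => (p.1 ++ kv.1 ++ "|", max p.2 kv.2.length)) (s, n)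
    = (l.foldl (fun a kv => a ++ kv.1 ++ "|") s, l.foldl (fun m kv => max m kv.2.length) n) := by
  induction l generalizing s n with
  | nil => rfl
  | cons kv l ih => simp only [List.foldl_cons]; exact ih _ _

theorem headerfold (l : List (String × List String)) (t : String) :
    l.foldl (fun s kv => s ++ kv.1 ++ "|") t = t ++ String.join (l.map (fun kv => kv.1 ++ "|")) := by
  induction l generalizing t with
  | nil => simp [String.join]
  | cons kv l ih => simp only [List.foldl_cons, List.map_cons]; rw [ih, sjoin_cons]; simp [String.append_assoc]

theorem sepfold (l : List (String × List String)) (t : String) :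
    l.foldl (fun s _ => s ++ "--|") t = t ++ String.join (List.replicate l.length "--|") := by
  induction l generalizing t with
  | nil => simp [String.join]
  | cons kv l ih =>
    simp only [List.foldl_cons, List.length_cons, List.replicate_succ]
    rw [ih, sjoin_cons]; simp [String.append_assoc]

def mlen (cols : List (List String)) : Nat := cols.foldr (fun c m => max c.length m) 0

theorem mlen_cons (c : List String) (cs : List (List String)) :
    mlen (c :: cs) = max c.length (mlen cs) := rfl

theorem maxfold (l : List (String × List String)) (n : Nat) :
    l.foldl (fun m kv => max m kv.2.length) n = max n (mlen (l.map (·.2))) := by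
  induction l generalizing n with
  | nil => simp [mlen]
  | cons kv l ih => simp only [List.foldl_cons, List.map_cons, mlen_cons]; rw [ih]; omega

theorem mlen_tail (cols : List (List String)) :
    mlen (cols.map (fun c => c.drop 1)) = mlen cols - 1 := by
  induction cols with
  | nil => simp [mlen]
  | cons c cs ih => simp only [List.map_cons, mlen_cons]; rw [ih]; simp only [List.length_drop]; omega

theorem mlen_pos (cols : List (List String)) (h : cols.any (fun c => !c.isEmpty) = true) :
    0 < mlen cols := by
  induction cols with
  | nil => simp at h
  | cons c cs ih =>
    simp only [List.any_cons, Bool.or_eq_true] at h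
    rw [mlen_cons]
    rcases h with h | h
    · have : 0 < c.length := by cases c <;> simp_all
      omega
    · have := ih h; omega

theorem mlen_all_empty (cols : List (List String)) (h : ¬ cols.any (fun c => !c.isEmpty) = true) :
    mlen cols = 0 := by
  induction cols with
  | nil => simp [mlen]
  | cons c cs ih =>
    simp only [List.any_cons, Bool.or_eq_true] at h
    push_neg at h
    rw [mlen_cons]
    have h1 : c.length = 0 := by
      cases c with
      | nil => rfl
      | cons x xs => simp at h
    have h2 := ih (by intro hc; exact h.2 hc)
    omega

def rowB (cols : List (List String)) (i : Nat) : String :=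
  "|" ++ String.join (cols.map (fun c => (if i < c.length then c.getD i "" else "") ++ "|"))

theorem cell_shift (i : Nat) (c : List String) :
    (if i + 1 < c.length then c.getD (i + 1) "" else "")
    = (if i < (c.drop 1).length then (c.drop 1).getD i "" else "") := by
  cases c with
  | nil => simp
  | cons x xs => simp [Nat.succ_lt_succ_iff]

theorem altRows_eq (cols : List (List String)) :
    altRows cols = (List.range (mlen cols)).map (rowB cols) := by
  induction cols using altRows.induct with
  | case1 cols h ih =>
    rw [altRows, dif_pos h]
    have hm : mlen cols = mlen (cols.map (fun c => c.drop 1)) + 1 := by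
      have := mlen_tail cols; have := mlen_pos cols h; omega
    rw [hm, List.range_succ_eq_map, List.map_cons, List.map_map]
    congr 1
    · unfold rowB
      congr 1
      congr 1
      apply List.map_congr_left
      intro c _
      cases c <;> simp
    · rw [show altRows (cols.map (fun c => c.drop 1)) = (List.range (mlen (cols.map (fun c => c.drop 1)))).map (rowB (cols.map (fun c => c.drop 1))) from by simpa using ih]
      apply List.map_congr_left
      intro i _
      show rowB (cols.map (fun c => c.drop 1)) i = (rowB cols ∘ Nat.succ) i
      simp only [Function.comp_apply]
      unfold rowB
      rw [List.map_map]
      congr 1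
      congr 1
      apply List.map_congr_left
      intro c _
      simp only [Function.comp_apply]
      rw [← cell_shift]
  | case2 cols h =>
    rw [altRows, dif_neg h, mlen_all_empty cols h]
    simp

theorem innerfold (fields : List (String × List String)) (i : Nat) (t : String) :
    fields.foldl (fun s kv => s ++ (if i < kv.2.length then kv.2.getD i "" else "") ++ "|") t
    = t ++ String.join (fields.map (fun kv => (if i < kv.2.length then kv.2.getD i "" else "") ++ "|")) := by
  induction fields generalizing t with
  | nil => simp [String.join]
  | cons kv l ih => simp only [List.foldl_cons, List.map_cons]; rw [ih, sjoin_cons]; simp [String.append_assoc]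

theorem bodyfold (fields : List (String × List String)) (l : List Nat) (t : String) :
    l.foldl (fun s i =>
      (fields.foldl (fun s kv => s ++ (if i < kv.2.length then kv.2.getD i "" else "") ++ "|") (s ++ "|")) ++ "
") t
    = t ++ String.join (l.map (fun i => rowB (fields.map (·.2)) i ++ "
")) := by
  induction l generalizing t with
  | nil => simp [String.join]
  | cons i l ih =>
    simp only [List.foldl_cons, List.map_cons]
    rw [ih, innerfold, sjoin_cons]
    unfold rowB
    rw [List.map_map]
    simp [String.append_assoc, Function.comp_def]

theorem format_manual_table_py_main (fields : List (String × List String)) :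
    format_manual_table_py fields = format_manual_table_py_alt fields := by
  simp only [format_manual_table_py, format_manual_table_py_alt]
  rw [pairfold]
  simp only [headerfold, maxfold, sepfold, bodyfold, altRows_eq]
  rw [joinlines]
  simp [String.append_assoc, sjoin_cons, List.map_map, Nat.zero_max, Function.comp_def,
        List.length_map]
  rw [show ("\n|" : String) = "\n" ++ "|" from rfl, String.append_assoc]

-- ===== VERDICT (by name: the statement is the Claim_ definition above) =====
theorem format_manual_table_py_spec : Claim_equal_format_manual_table_py := by
  intro fields _
  exact format_manual_table_py_main fields
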